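-- pv_equiv track=rewrite | github.com/tthouvenot/100_exercices_python | exercice_59.py | unified_list
-- ===== SOURCE A (Python) =====
-- def unified_list(list1, list2, list3):
--
--     for i in range(len(list1)-1, -1, -1):
--
--         if list1.count(list1[i]) != 1:
--             list1.pop(i)
--
--     for element in list3:
--
--         if list1.count(element) == 0:
--             list1.append(element)
--
--     for element in list2:
--         if list1.count(element) == 0:
--             list1.append(element)
--
--     list1.sort()
--
--     return list1
-- ===== SOURCE B (Python) =====
-- def unified_list(list1, list2, list3):
--     # sort the combined list once, then drop adjacent duplicates in one pass;
--     # result written back via slice assignment so list1 is mutated like in A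
--     combined = sorted(list1 + list2 + list3)
--     result = []
--     for x in combined:
--         if not result or x != result[-1]:
--             result.append(x)
--     list1[:] = result
--     return list1
-- ===== Notes on version B (the rewrite author's own statement) =====
-- stated objective: faster
-- what changed: A dedups list1 with a quadratic count/pop index loop and appends each missing element of list3/list2 with a linear count scan before sorting; B sorts the concatenation once and removes adjacent duplicates in a single linear pass.
import Mathlib
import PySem

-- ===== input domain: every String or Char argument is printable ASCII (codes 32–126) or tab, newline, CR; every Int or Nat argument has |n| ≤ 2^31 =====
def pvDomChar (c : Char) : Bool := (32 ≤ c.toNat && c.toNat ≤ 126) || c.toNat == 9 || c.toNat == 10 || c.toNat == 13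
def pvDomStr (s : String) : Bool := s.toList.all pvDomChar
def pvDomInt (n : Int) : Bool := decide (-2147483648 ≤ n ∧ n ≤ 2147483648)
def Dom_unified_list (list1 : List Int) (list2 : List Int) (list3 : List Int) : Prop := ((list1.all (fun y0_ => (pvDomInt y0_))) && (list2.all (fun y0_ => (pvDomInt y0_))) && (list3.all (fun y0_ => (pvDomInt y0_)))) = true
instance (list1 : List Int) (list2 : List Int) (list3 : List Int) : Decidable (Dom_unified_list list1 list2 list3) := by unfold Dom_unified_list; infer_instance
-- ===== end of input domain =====

-- B sorts the concatenation once and removes adjacent duplicates in one pass, instead of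
-- A's count/pop dedup loop plus per-element count scans before sorting (B also mutates
-- list1 in place like A; the equivalence proved here is about the return value).


-- ===== PORT A =====
-- one step of A's backward dedup loop: 'if list1.count(list1[i]) != 1: list1.pop(i)';
-- the getD defaults are never used (i is always in range while the loop runs)
def popStep (acc : List Int) (i : Int) : List Int :=
  if acc.count (PySem.List.pyGetD acc i 0) ≠ 1 then
    ((PySem.List.pop? acc i).map Prod.snd).getD acc
  else acc

-- 'if list1.count(element) == 0: list1.append(element)'
def appendStep (acc : List Int) (e : Int) : List Int :=
  if acc.count e = 0 then acc ++ [e] else acc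

def unified_list (list1 : List Int) (list2 : List Int) (list3 : List Int) : List Int :=
  let d := (PySem.List.pyRange ((PySem.List.len list1) - 1) (-1) (-1)).foldl popStep list1
  let d3 := list3.foldl appendStep d
  let d2 := list2.foldl appendStep d3
  PySem.List.sorted d2 (fun x => x) false

-- ===== PORT B =====
-- 'if not result or x != result[-1]: result.append(x)'
def adjStep (res : List Int) (x : Int) : List Int :=
  if res = [] ∨ PySem.List.pyGet? res (-1) ≠ some x then res ++ [x] else res

def unified_list_alt (list1 : List Int) (list2 : List Int) (list3 : List Int) : List Int :=
  let combined := PySem.List.sorted (list1 ++ list2 ++ list3) (fun x => x) false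
  combined.foldl adjStep []

-- ===== PRECONDITION & SPEC =====
def Spec_unified_list (list1 : List Int) (list2 : List Int) (list3 : List Int) (out : List Int) : Prop := out = unified_list_alt list1 list2 list3
instance (list1 : List Int) (list2 : List Int) (list3 : List Int) (out : List Int) : Decidable (Spec_unified_list list1 list2 list3 out) := by unfold Spec_unified_list; infer_instance

-- ===== CLAIM (what is proved, stated in full; the proofs are below) =====
def Claim_equal_unified_list : Prop := ∀ (list1 : List Int) (list2 : List Int) (list3 : List Int), Dom_unified_list list1 list2 list3 → Spec_unified_list list1 list2 list3 (unified_list list1 list2 list3)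

-- ===== LEMMAS AND PROOFS =====

-- A's backward dedup loop: given that every element of the already-processed suffix
-- occurs exactly once, the loop yields a duplicate-free list with the same members.
theorem popLoop_props (m : Nat) : ∀ (l : List Int), m ≤ l.length →
    (∀ x ∈ l.drop m, l.count x = 1) →
    ((PySem.List.pyRange ((m : Int) - 1) (-1) (-1)).foldl popStep l).Nodup ∧
    (∀ x, x ∈ (PySem.List.pyRange ((m : Int) - 1) (-1) (-1)).foldl popStep l ↔ x ∈ l) := by
  induction m with
  | zero =>
    intro l _ hinv
    rw [PySem.List.pyRange_neg_one_eq_nil (by norm_num)]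
    refine ⟨List.nodup_iff_count_le_one.mpr fun a => ?_, by simp⟩
    by_cases ha : a ∈ l
    · exact le_of_eq (hinv a (by simpa using ha))
    · simp [List.count_eq_zero.mpr ha]
  | succ m ih =>
    intro l hm hinv
    have hmlt : m < l.length := hm
    have hcast : ((m + 1 : Nat) : Int) - 1 = (m : Int) := by push_cast; ring
    rw [hcast, PySem.List.pyRange_neg_one_cons (by omega), List.foldl_cons]
    have hget : PySem.List.pyGetD l (m : Int) 0 = l[m]'hmlt := by
      rw [PySem.List.pyGetD_eq_getElem l 0 (by omega) (by exact_mod_cast hmlt)]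
      simp
    have hdrop : l.drop m = l[m]'hmlt :: l.drop (m + 1) := List.drop_eq_getElem_cons hmlt
    by_cases hcnt : l.count (l[m]'hmlt) = 1
    · have hstep : popStep l (m : Int) = l := by
        simp [popStep, hget, hcnt]
      rw [hstep]
      refine ih l hmlt.le fun x hx => ?_
      rw [hdrop] at hx
      rcases List.mem_cons.mp hx with h | h
      · rw [h]; exact hcnt
      · exact hinv x h
    · have hstep : popStep l (m : Int) = l.eraseIdx m := by
        simp [popStep, hget, hcnt, PySem.List.pop?_natCast l m hmlt]
      rw [hstep]
      -- the erased element still occurs elsewhere, so membership is preserved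
      have hdecomp : l = l.take m ++ l[m]'hmlt :: l.drop (m + 1) := by
        rw [← hdrop, List.take_append_drop]
      have herase : l.eraseIdx m = l.take m ++ l.drop (m + 1) :=
        List.eraseIdx_eq_take_drop_succ l m
      have hcount : ∀ x : Int, l.count x =
          (l.take m).count x + ((if x = l[m]'hmlt then 1 else 0) + (l.drop (m + 1)).count x) := by
        intro x
        conv_lhs => rw [hdecomp]
        rw [List.count_append, List.count_cons]
        by_cases hxm : x = l[m]'hmlt <;> simp [hxm] <;> omega
      have hmemc : ∀ x, x ∈ l.eraseIdx m ↔ x ∈ l := by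
        intro x
        constructor
        · intro hx
          rw [herase] at hx
          rcases List.mem_append.mp hx with h | h
          · exact List.mem_of_mem_take h
          · exact List.mem_of_mem_drop h
        · intro hx
          rw [herase]
          by_cases hxm : x = l[m]'hmlt
          · have hge : 1 ≤ l.count x := List.count_pos_iff.mpr hx
            have hc := hcount x
            rw [if_pos hxm] at hc
            have h2 : l.count x ≠ 1 := by rw [hxm]; exact hcnt
            have h3 : 1 ≤ (l.take m).count x + (l.drop (m + 1)).count x := by omega
            rw [List.mem_append]
            rcases Nat.lt_or_ge 0 ((l.take m).count x) with h | h
            · exact Or.inl (List.count_pos_iff.mp h)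
            · exact Or.inr (List.count_pos_iff.mp (by omega))
          · have hx' : x ∈ l.take m ++ l[m]'hmlt :: l.drop (m + 1) := hdecomp ▸ hx
            rcases List.mem_append.mp hx' with h | h
            · exact List.mem_append.mpr (Or.inl h)
            · rcases List.mem_cons.mp h with h | h
              · exact absurd h hxm
              · exact List.mem_append.mpr (Or.inr h)
      have hlen' : m ≤ (l.eraseIdx m).length := by
        rw [List.length_eraseIdx_of_lt hmlt]; omega
      have hinv' : ∀ x ∈ (l.eraseIdx m).drop m, (l.eraseIdx m).count x = 1 := by
        intro x hx
        have htk : (l.take m).length = m := List.length_take_of_le hmlt.le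
        have hdrop' : (l.eraseIdx m).drop m = l.drop (m + 1) := by
          rw [herase, List.drop_left' htk]
        rw [hdrop'] at hx
        have h1 : l.count x = 1 := hinv x hx
        have hxm : x ≠ l[m]'hmlt := by
          intro h
          have hc := hcount x
          rw [if_pos h] at hc
          have : 1 ≤ (l.drop (m + 1)).count x := List.count_pos_iff.mpr hx
          omega
        have hce : (l.eraseIdx m).count x = (l.take m).count x + (l.drop (m + 1)).count x := by
          rw [herase, List.count_append]
        have hc := hcount x
        rw [if_neg hxm] at hc
        omega
      obtain ⟨h1, h2⟩ := ih (l.eraseIdx m) hlen' hinv'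
      exact ⟨h1, fun x => (h2 x).trans (hmemc x)⟩

-- the append-if-absent loop keeps Nodup and adds exactly the new members
theorem appendLoop_props (xs : List Int) : ∀ (c : List Int), c.Nodup →
    (xs.foldl appendStep c).Nodup ∧
    (∀ x, x ∈ xs.foldl appendStep c ↔ x ∈ c ∨ x ∈ xs) := by
  induction xs with
  | nil => intro c hc; exact ⟨hc, by simp⟩
  | cons e xs ih =>
    intro c hc
    simp only [List.foldl_cons]
    by_cases he : c.count e = 0
    · have hne : e ∉ c := List.count_eq_zero.mp he
      have hstep : appendStep c e = c ++ [e] := by simp [appendStep, he]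
      rw [hstep]
      obtain ⟨h1, h2⟩ := ih (c ++ [e]) (by
        rw [List.nodup_append]
        refine ⟨hc, List.nodup_singleton _, ?_⟩
        intro a ha b hb
        rw [List.mem_singleton.mp hb]
        exact fun h => hne (h ▸ ha))
      refine ⟨h1, fun x => ?_⟩
      rw [h2]; simp; tauto
    · have hec : e ∈ c := by
        by_contra h; exact he (List.count_eq_zero.mpr h)
      have hstep : appendStep c e = c := by simp [appendStep, he]
      rw [hstep]
      obtain ⟨h1, h2⟩ := ih c hc
      refine ⟨h1, fun x => ?_⟩
      rw [h2]
      constructor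
      · tauto
      · rintro (h | h)
        · exact Or.inl h
        · rcases List.mem_cons.mp h with h | h
          · subst h; exact Or.inl hec
          · exact Or.inr h

-- in a strictly increasing list every element is at most the last one
theorem pairwise_lt_le_getLast (l : List Int) (h : l.Pairwise (· < ·)) :
    ∀ y ∈ l, ∀ L, l.getLast? = some L → y ≤ L := by
  induction l with
  | nil => intro y hy; simp at hy
  | cons a t ih =>
    intro y hy L hL
    obtain ⟨ha, ht⟩ := List.pairwise_cons.mp h
    rcases List.mem_cons.mp hy with h' | h'
    · subst h'
      cases t with
      | nil => simp at hL; omega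
      | cons b t' =>
        rw [List.getLast?_cons_cons] at hL
        have hLm : L ∈ b :: t' := List.mem_of_getLast? hL
        exact (ha L hLm).le
    · cases t with
      | nil => simp at h'
      | cons b t' =>
        rw [List.getLast?_cons_cons] at hL
        exact ih ht y h' L hL

-- B's adjacent-dedup pass over a ≤-sorted suffix, generalized over the accumulator
theorem adjLoop_props (rest : List Int) : ∀ (acc : List Int), acc.Pairwise (· < ·) →
    (∀ y ∈ acc, ∀ z ∈ rest, y ≤ z) → rest.Pairwise (· ≤ ·) →
    (rest.foldl adjStep acc).Pairwise (· < ·) ∧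
    (∀ x, x ∈ rest.foldl adjStep acc ↔ x ∈ acc ∨ x ∈ rest) := by
  induction rest with
  | nil => intro acc hpw _ _; exact ⟨hpw, by simp⟩
  | cons x rest ih =>
    intro acc hpw hle hsorted
    obtain ⟨hx, hrest⟩ := List.pairwise_cons.mp hsorted
    simp only [List.foldl_cons]
    by_cases hlast : acc.getLast? = some x
    · have hstep : adjStep acc x = acc := by
        have hne : acc ≠ [] := by intro h; rw [h] at hlast; simp at hlast
        simp [adjStep, PySem.List.pyGet?_neg_one, hlast, hne]
      rw [hstep]
      obtain ⟨h1, h2⟩ := ih acc hpw (fun y hy z hz => hle y hy z (List.mem_cons_of_mem x hz)) hrest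
      refine ⟨h1, fun y => ?_⟩
      rw [h2]
      have hxa : x ∈ acc := List.mem_of_getLast? hlast
      constructor
      · tauto
      · rintro (h | h)
        · exact Or.inl h
        · rcases List.mem_cons.mp h with h | h
          · subst h; exact Or.inl hxa
          · exact Or.inr h
    · have hstep : adjStep acc x = acc ++ [x] := by
        rcases Decidable.em (acc = []) with h | h
        · simp [adjStep, h]
        · simp [adjStep, PySem.List.pyGet?_neg_one, hlast, h]
      rw [hstep]
      have hlt : ∀ y ∈ acc, y < x := by
        intro y hy
        have hyx : y ≤ x := hle y hy x List.mem_cons_self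
        rcases lt_or_eq_of_le hyx with h | h
        · exact h
        · exfalso
          subst h
          have hne : acc ≠ [] := by intro h; rw [h] at hy; simp at hy
          obtain ⟨L, hL⟩ := List.getLast?_isSome.mpr hne |> Option.isSome_iff_exists.mp
          have hLm : L ∈ acc := List.mem_of_getLast? hL
          have h1 : y ≤ L := pairwise_lt_le_getLast acc hpw y hy L hL
          have h2 : L ≤ y := hle L hLm y List.mem_cons_self
          have : L = y := le_antisymm h2 h1
          rw [this] at hL
          exact hlast hL
      have hpw' : (acc ++ [x]).Pairwise (· < ·) := by
        rw [List.pairwise_append]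
        exact ⟨hpw, List.pairwise_singleton _ _, fun y hy z hz => by
          rw [List.mem_singleton.mp hz]; exact hlt y hy⟩
      have hle' : ∀ y ∈ acc ++ [x], ∀ z ∈ rest, y ≤ z := by
        intro y hy z hz
        rcases List.mem_append.mp hy with h | h
        · exact hle y h z (List.mem_cons_of_mem x hz)
        · rw [List.mem_singleton.mp h]; exact hx z hz
      obtain ⟨h1, h2⟩ := ih (acc ++ [x]) hpw' hle' hrest
      refine ⟨h1, fun y => ?_⟩
      rw [h2]; simp; tauto

-- ===== VERDICT (by name: the statement is the Claim_ definition above) =====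
theorem unified_list_spec : Claim_equal_unified_list := by
  intro list1 list2 list3 _
  unfold Spec_unified_list unified_list unified_list_alt
  -- A's pre-sort list: nodup, members = members of the three lists
  obtain ⟨hd_nd, hd_mem⟩ := popLoop_props list1.length list1 le_rfl (by simp)
  obtain ⟨h3_nd, h3_mem⟩ := appendLoop_props list3 _ hd_nd
  obtain ⟨h2_nd, h2_mem⟩ := appendLoop_props list2 _ h3_nd
  -- B's result: strictly increasing, same members
  obtain ⟨hb_pw, hb_mem⟩ := adjLoop_props (PySem.List.sorted (list1 ++ list2 ++ list3) (fun x => x) false)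
      [] List.Pairwise.nil (by simp) (PySem.List.sorted_pairwise _ _)
  have hlen : (PySem.List.len list1) = (list1.length : Int) := by simp [PySem.List.len_eq]
  rw [hlen]
  refine PySem.List.sorted_eq_of_perm_of_pairwise_lt _ _ _ ?_ hb_pw
  refine (List.perm_ext_iff_of_nodup (hb_pw.imp ne_of_lt) h2_nd).mpr ?_
  intro a
  simp only [hb_mem, PySem.List.mem_sorted, List.mem_append, h2_mem, h3_mem, hd_mem]
  tauto
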